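-- pv_equiv track=rewrite | github.com/CvetelinLozanov/Softuni_Python | softuni_fundamentals/text_processing_exercise/10_winning_ticket.py | check_ticket
-- ===== SOURCE A (Python) =====
-- def check_ticket(ticket: str):
--     valid_symbols = ['@', '#', '$', '^']
--     left_part = ticket[:10]
--     right_part = ticket[10:]
--     if len(ticket) != 20:
--         return 'invalid ticket'
--
--     for symbol in valid_symbols:
--         for uninterrupted_match_length in range(10, 5, -1):
--             current_win_ticket = symbol * uninterrupted_match_length
--
--             if current_win_ticket in left_part and current_win_ticket in right_part:
--                 if len(current_win_ticket) == 10: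
--                     return f'ticket "{ticket}" - {uninterrupted_match_length}{symbol} Jackpot!'
--
--                 return f'ticket "{ticket}" - {uninterrupted_match_length}{symbol}'
--
--     return f'ticket "{ticket}" - no match'
-- ===== SOURCE B (Python) =====
-- def check_ticket(ticket: str):
--     if len(ticket) != 20:
--         return 'invalid ticket'
--     left_part = ticket[:10]
--     right_part = ticket[10:]
--
--     def max_run(part, sym):
--         best = cur = 0
--         for ch in part:
--             cur = cur + 1 if ch == sym else 0
--             if cur > best:
--                 best = cur
--         return best
--
--     for symbol in '@#$^':
--         m = min(max_run(left_part, symbol), max_run(right_part, symbol))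
--         if m >= 6:
--             jackpot = ' Jackpot!' if m == 10 else ''
--             return f'ticket "{ticket}" - {m}{symbol}{jackpot}'
--
--     return f'ticket "{ticket}" - no match'
-- ===== Notes on version B (the rewrite author's own statement) =====
-- stated objective: alternative
-- what changed: B replaces A's nested search (building symbol*length candidate strings for lengths 10..6 and doing substring-membership tests on each half) by a single run-length scan per half per symbol, returning min(leftRun, rightRun) when it reaches 6.
import Mathlib
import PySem

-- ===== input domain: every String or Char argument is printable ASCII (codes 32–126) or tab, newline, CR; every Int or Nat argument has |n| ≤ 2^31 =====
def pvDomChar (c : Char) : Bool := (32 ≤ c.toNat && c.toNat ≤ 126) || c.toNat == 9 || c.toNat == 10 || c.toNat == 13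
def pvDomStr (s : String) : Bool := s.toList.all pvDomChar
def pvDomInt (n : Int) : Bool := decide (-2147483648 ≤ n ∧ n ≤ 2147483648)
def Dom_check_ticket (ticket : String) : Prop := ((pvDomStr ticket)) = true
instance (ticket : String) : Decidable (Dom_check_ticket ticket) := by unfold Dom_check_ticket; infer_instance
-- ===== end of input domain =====

-- B measures the longest run of each winning symbol in each half directly (one pass per half)
-- and reports min(leftRun, rightRun), instead of A's membership tests of symbol*length candidates.

-- ===== PORT A =====
-- A-side helper: the inner 'for uninterrupted_match_length in range(10, 5, -1)' loop with early returns
def pvInnerA (ticket left_part right_part symbol : String) : List Int → Option String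
  | [] => none
  | L :: rest =>
    let current_win_ticket : String := String.ofList (PySem.List.pyRepeat symbol.toList L)
    if PySem.Str.isIn current_win_ticket left_part && PySem.Str.isIn current_win_ticket right_part then
      if PySem.Str.len current_win_ticket == 10 then
        some (String.ofList ("ticket \"".toList ++ ticket.toList ++ "\" - ".toList
          ++ (PySem.Int.toStr L).toList ++ symbol.toList ++ " Jackpot!".toList))
      else
        some (String.ofList ("ticket \"".toList ++ ticket.toList ++ "\" - ".toList
          ++ (PySem.Int.toStr L).toList ++ symbol.toList))
    else pvInnerA ticket left_part right_part symbol rest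

-- A-side helper: the outer 'for symbol in valid_symbols' loop
def pvOuterA (ticket left_part right_part : String) : List String → Option String
  | [] => none
  | symbol :: rest =>
    match pvInnerA ticket left_part right_part symbol (PySem.List.pyRange 10 5 (-1)) with
    | some s => some s
    | none => pvOuterA ticket left_part right_part rest

def check_ticket (ticket : String) : String :=
  let valid_symbols : List String := ["@", "#", "$", "^"]
  let left_part := PySem.Str.slice ticket none (some 10)
  let right_part := PySem.Str.slice ticket (some 10) none
  if PySem.Str.len ticket ≠ 20 then "invalid ticket"
  else
    match pvOuterA ticket left_part right_part valid_symbols with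
    | some s => s
    | none => String.ofList ("ticket \"".toList ++ ticket.toList ++ "\" - no match".toList)

-- ===== PORT B =====
-- B-side helper: max_run(part, sym) — longest consecutive run, one pass with (cur, best)
def pvMaxRun (part : List Char) (sym : Char) : Nat :=
  (part.foldl (fun (st : Nat × Nat) ch =>
      let cur := if ch == sym then st.1 + 1 else 0
      (cur, if cur > st.2 then cur else st.2)) (0, 0)).2

-- B-side helper: the 'for symbol in "@#$^"' loop
def pvLoopB (ticket left_part right_part : String) : List Char → Option String
  | [] => none
  | symbol :: rest =>
    let m := min (pvMaxRun left_part.toList symbol) (pvMaxRun right_part.toList symbol)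
    if 6 ≤ m then
      some (String.ofList ("ticket \"".toList ++ ticket.toList ++ "\" - ".toList
        ++ (PySem.Int.toStr (m : Int)).toList ++ [symbol]
        ++ (if m == 10 then " Jackpot!".toList else [])))
    else pvLoopB ticket left_part right_part rest

def check_ticket_alt (ticket : String) : String :=
  if PySem.Str.len ticket ≠ 20 then "invalid ticket"
  else
    let left_part := PySem.Str.slice ticket none (some 10)
    let right_part := PySem.Str.slice ticket (some 10) none
    match pvLoopB ticket left_part right_part "@#$^".toList with
    | some s => s
    | none => String.ofList ("ticket \"".toList ++ ticket.toList ++ "\" - no match".toList)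

-- ===== PRECONDITION & SPEC =====
def Spec_check_ticket (ticket : String) (out : String) : Prop := out = check_ticket_alt ticket
instance (ticket : String) (out : String) : Decidable (Spec_check_ticket ticket out) := by unfold Spec_check_ticket; infer_instance

-- ===== CLAIM (what is proved, stated in full; the proofs are below) =====
def Claim_equal_check_ticket : Prop := ∀ (ticket : String), Dom_check_ticket ticket → Spec_check_ticket ticket (check_ticket ticket)

-- ===== LEMMAS AND PROOFS =====

-- leading run of c
def pvPrefRun (c : Char) : List Char → Nat
  | [] => 0
  | x :: xs => if x = c then pvPrefRun c xs + 1 else 0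

-- max run of c in l, where a run of length cur is already open just before l
def pvH (c : Char) (cur : Nat) : List Char → Nat
  | [] => cur
  | x :: xs => if x = c then pvH c (cur + 1) xs else max cur (pvH c 0 xs)

lemma pvH_ge (c : Char) (l : List Char) : ∀ cur, cur ≤ pvH c cur l := by
  induction l with
  | nil => intro cur; simp [pvH]
  | cons x xs ih =>
    intro cur
    simp only [pvH]
    split
    · exact le_trans (Nat.le_succ _) (ih _)
    · exact le_max_left _ _

lemma pvH_le (c : Char) (l : List Char) : ∀ cur, pvH c cur l ≤ cur + l.length := by
  induction l with
  | nil => intro cur; simp [pvH]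
  | cons x xs ih =>
    intro cur
    simp only [pvH, List.length_cons]
    split
    · have := ih (cur + 1); omega
    · have := ih 0; omega

lemma prefRun_iff (c : Char) (l : List Char) :
    ∀ k, List.replicate k c <+: l ↔ k ≤ pvPrefRun c l := by
  induction l with
  | nil =>
    intro k; cases k with
    | zero => simp
    | succ n => simp [List.replicate, pvPrefRun]
  | cons x xs ih =>
    intro k; cases k with
    | zero => simp
    | succ n =>
      simp only [List.replicate, List.cons_prefix_cons, pvPrefRun]
      constructor
      · rintro ⟨rfl, h⟩
        rw [if_pos rfl]
        have := (ih n).mp h; omega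
      · intro h
        by_cases hx : x = c
        · rw [if_pos hx] at h
          exact ⟨hx.symm, (ih n).mpr (by omega)⟩
        · rw [if_neg hx] at h; omega

lemma infix_iff_pvH (c : Char) (l : List Char) :
    ∀ cur k, (List.replicate k c <:+: l ∨ k ≤ cur + pvPrefRun c l) ↔ k ≤ pvH c cur l := by
  induction l with
  | nil =>
    intro cur k
    simp only [pvH, pvPrefRun, Nat.add_zero, List.infix_nil, List.replicate_eq_nil_iff]
    constructor
    · rintro (rfl | h) <;> omega
    · exact Or.inr
  | cons x xs ih =>
    intro cur k
    rw [List.infix_cons_iff, prefRun_iff]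
    simp only [pvH, pvPrefRun]
    by_cases hx : x = c
    · simp only [if_pos hx]
      rw [← ih (cur + 1) k]
      constructor
      · rintro ((h | h) | h)
        · right; omega
        · left; exact h
        · right; omega
      · rintro (h | h)
        · left; right; exact h
        · right; omega
    · simp only [if_neg hx]
      rw [le_max_iff, ← ih 0 k]
      constructor
      · rintro ((h | h) | h)
        · left; omega
        · right; left; exact h
        · left; omega
      · rintro (h | (h | h))
        · right; omega
        · left; right; exact h
        · left; right
          exact ((prefRun_iff c xs k).mpr (by omega)).isInfix

lemma infix_iff_pvH0 (c : Char) (l : List Char) (k : Nat) :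
    List.replicate k c <:+: l ↔ k ≤ pvH c 0 l := by
  rw [← infix_iff_pvH c l 0 k]
  constructor
  · exact Or.inl
  · rintro (h | h)
    · exact h
    · exact ((prefRun_iff c l k).mpr (by omega)).isInfix

lemma pvMaxRun_foldl (c : Char) (l : List Char) :
    ∀ cur best, cur ≤ best →
      (l.foldl (fun (st : Nat × Nat) ch =>
        let cur := if ch == c then st.1 + 1 else 0
        (cur, if cur > st.2 then cur else st.2)) (cur, best)).2 = max best (pvH c cur l) := by
  induction l with
  | nil => intro cur best h; simp [pvH]; omega
  | cons x xs ih =>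
    intro cur best h
    simp only [List.foldl_cons, pvH]
    by_cases hx : x = c
    · simp only [hx, beq_self_eq_true, if_true]
      rw [ih (cur + 1) (if cur + 1 > best then cur + 1 else best) (by split <;> omega)]
      have h1 := pvH_ge c xs (cur + 1)
      split <;> omega
    · have hb : (x == c) = false := by simp [hx]
      simp only [hb, Bool.false_eq_true, if_false, if_neg hx]
      rw [ih 0 (if 0 > best then 0 else best) (by split <;> omega)]
      have h1 := pvH_ge c xs 0
      split <;> omega

lemma pvMaxRun_eq (l : List Char) (c : Char) : pvMaxRun l c = pvH c 0 l := by
  unfold pvMaxRun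
  rw [pvMaxRun_foldl c l 0 0 (le_refl 0)]
  simp

lemma isIn_replicate (c : Char) (k : Nat) (part : String) :
    PySem.Str.isIn (String.ofList (List.replicate k c)) part = decide (k ≤ pvH c 0 part.toList) := by
  by_cases h : k ≤ pvH c 0 part.toList
  · simp only [h, decide_true]
    rw [PySem.Str.isIn_iff_infix, String.toList_ofList]
    exact (infix_iff_pvH0 c part.toList k).mpr h
  · simp only [h, decide_false]
    rw [Bool.eq_false_iff, Ne, PySem.Str.isIn_iff_infix, String.toList_ofList]
    exact fun hc => h ((infix_iff_pvH0 c part.toList k).mp hc)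

-- the per-symbol step: A's inner loop (lengths 10..6) equals B's run-length test
set_option maxHeartbeats 1000000 in
lemma step_eq (ticket left right : String) (c : Char)
    (hl : left.toList.length = 10) (hr : right.toList.length = 10) :
    pvInnerA ticket left right (String.ofList [c]) (PySem.List.pyRange 10 5 (-1)) =
      (let m := min (pvMaxRun left.toList c) (pvMaxRun right.toList c)
       if 6 ≤ m then
         some (String.ofList ("ticket \"".toList ++ ticket.toList ++ "\" - ".toList
           ++ (PySem.Int.toStr (m : Int)).toList ++ [c]
           ++ (if m == 10 then " Jackpot!".toList else [])))
       else none) := by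
  have hrange : PySem.List.pyRange 10 5 (-1) = [10, 9, 8, 7, 6] := by decide
  have ha : pvH c 0 left.toList ≤ 10 := by
    have := pvH_le c left.toList 0; omega
  have hb : pvH c 0 right.toList ≤ 10 := by
    have := pvH_le c right.toList 0; omega
  simp only [pvMaxRun_eq]
  set a := pvH c 0 left.toList with hadef
  set b := pvH c 0 right.toList with hbdef
  have hcond : ∀ (L : Int),
      (PySem.Str.isIn (String.ofList (PySem.List.pyRepeat (String.ofList [c]).toList L)) left
        && PySem.Str.isIn (String.ofList (PySem.List.pyRepeat (String.ofList [c]).toList L)) right)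
      = decide (L.toNat ≤ min a b) := by
    intro L
    rw [String.toList_ofList, PySem.List.pyRepeat_singleton, isIn_replicate, isIn_replicate,
      ← hadef, ← hbdef]
    by_cases h1 : L.toNat ≤ a <;> by_cases h2 : L.toNat ≤ b <;>
      simp [h1, h2]
  have hlenrep : ∀ (L : Int),
      PySem.Str.len (String.ofList (PySem.List.pyRepeat (String.ofList [c]).toList L))
        = (L.toNat : Int) := by
    intro L
    rw [String.toList_ofList, PySem.List.pyRepeat_singleton, PySem.Str.len_eq]
    simp
  rw [hrange]
  simp only [pvInnerA, hcond, hlenrep]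
  set m := min a b with hmdef
  have hm : m ≤ 10 := by omega
  interval_cases m <;> norm_num [String.toList_ofList]

lemma loop_eq (cs : List Char) (ticket left right : String)
    (hl : left.toList.length = 10) (hr : right.toList.length = 10) :
    pvOuterA ticket left right (cs.map (fun c => String.ofList [c])) = pvLoopB ticket left right cs := by
  induction cs with
  | nil => rfl
  | cons c rest ih =>
    simp only [List.map_cons, pvOuterA, pvLoopB]
    rw [step_eq ticket left right c hl hr]
    by_cases h : 6 ≤ min (pvMaxRun left.toList c) (pvMaxRun right.toList c)
    · simp [h]
    · simp [h, ih]

-- ===== VERDICT (by name: the statement is the Claim_ definition above) =====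
theorem check_ticket_spec : Claim_equal_check_ticket := by
  intro ticket _
  unfold Spec_check_ticket check_ticket check_ticket_alt
  by_cases h : PySem.Str.len ticket = 20
  · have hlen : ticket.toList.length = 20 := by
      have h' := h
      rw [PySem.Str.len_eq] at h'
      exact_mod_cast h'
    have hl : (PySem.Str.slice ticket none (some 10)).toList.length = 10 := by
      simp [pysem, hlen]
    have hr : (PySem.Str.slice ticket (some 10) none).toList.length = 10 := by
      simp [pysem, hlen]
    have hsyms : (["@", "#", "$", "^"] : List String)
        = (("@#$^".toList).map (fun c => String.ofList [c])) := by decide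
    simp only [h, ne_eq, not_true_eq_false, if_false, hsyms]
    rw [loop_eq _ _ _ _ hl hr]
  · simp only [ne_eq, h, not_false_eq_true, if_true]
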